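-- pv_equiv track=rewrite | github.com/vika4433/smart-intent-router | smart-intent-router-server/src/utils/conversation_manager.py | _ensure_conversation_flow
-- ===== SOURCE A (Python) =====
-- from typing import List, Dict, Any, Optional
--
-- def _ensure_conversation_flow(messages: List[Dict[str, Any]]) -> List[Dict[str, Any]]:
--     if not messages:
--         return messages
--
--     corrected = []
--     last_role = None
--     for msg in messages:
--         current_role = msg.get("role")
--         if current_role != last_role or current_role == "system":
--             corrected.append(msg)
--             last_role = current_role
--     return corrected
-- ===== SOURCE B (Python) =====
-- def _ensure_conversation_flow(messages):
--     roles = [m.get("role") for m in messages]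
--     return [m for m, r, prev in zip(messages, roles, [None] + roles)
--             if r == "system" or r != prev]
-- ===== Notes on version B (the rewrite author's own statement) =====
-- stated objective: simpler
-- what changed: Replaces the mutable last_role scan with a stateless comprehension: precompute the role list and zip each message with its role and the previous role (roles shifted by one, None first), keeping a message when its role is 'system' or differs from the previous role.
import Mathlib
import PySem

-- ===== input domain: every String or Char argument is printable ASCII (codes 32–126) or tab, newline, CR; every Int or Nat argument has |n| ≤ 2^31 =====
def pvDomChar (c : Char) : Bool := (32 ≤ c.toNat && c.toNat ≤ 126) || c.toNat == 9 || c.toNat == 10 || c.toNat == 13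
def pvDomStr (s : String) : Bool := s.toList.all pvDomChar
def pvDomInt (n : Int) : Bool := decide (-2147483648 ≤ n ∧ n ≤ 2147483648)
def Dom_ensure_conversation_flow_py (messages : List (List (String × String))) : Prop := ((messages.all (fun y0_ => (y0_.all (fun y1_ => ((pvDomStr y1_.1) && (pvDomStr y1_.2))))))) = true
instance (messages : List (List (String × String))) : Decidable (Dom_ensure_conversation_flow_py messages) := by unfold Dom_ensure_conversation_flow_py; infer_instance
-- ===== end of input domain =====

-- B replaces A's mutable last_role scan by a stateless comprehension over the role list
-- zipped with its one-step shift (objective: simpler; same output on every input).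

-- ===== PORT A =====
-- literal port of A: guard on empty, then a fold carrying (corrected, last_role)
def ensure_conversation_flow_py (messages : List (List (String × String))) : List (List (String × String)) :=
  if messages = [] then messages
  else
    (messages.foldl
      (fun (st : List (List (String × String)) × Option String) msg =>
        let current := List.lookup "role" msg
        if current ≠ st.2 ∨ current = some "system" then (st.1 ++ [msg], current) else st)
      ([], none)).1

-- ===== PORT B =====
-- literal port of B: roles = [m.get("role") for m in messages];
-- [m for m, r, prev in zip(messages, roles, [None] + roles) if r == "system" or r != prev]
def ensure_conversation_flow_py_alt (messages : List (List (String × String))) : List (List (String × String)) :=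
  let roles := messages.map (fun m => List.lookup "role" m)
  ((messages.zip roles).zip (none :: roles)).filterMap
    (fun p => if p.1.2 = some "system" ∨ p.1.2 ≠ p.2 then some p.1.1 else none)

-- ===== PRECONDITION & SPEC =====
def Spec_ensure_conversation_flow_py (messages : List (List (String × String))) (out : List (List (String × String))) : Prop := out = ensure_conversation_flow_py_alt messages
instance (messages : List (List (String × String))) (out : List (List (String × String))) : Decidable (Spec_ensure_conversation_flow_py messages out) := by unfold Spec_ensure_conversation_flow_py; infer_instance

-- ===== CLAIM (what is proved, stated in full; the proofs are below) =====
def Claim_equal_ensure_conversation_flow_py : Prop := ∀ (messages : List (List (String × String))), Dom_ensure_conversation_flow_py messages → Spec_ensure_conversation_flow_py messages (ensure_conversation_flow_py messages)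

-- ===== LEMMAS AND PROOFS =====

-- common characterisation: keep each message whose role differs from the previous
-- message's role (none before the first) or is "system"
def pvKeepFrom (last : Option String) : List (List (String × String)) → List (List (String × String))
  | [] => []
  | m :: rest =>
    let r := List.lookup "role" m
    if r ≠ last ∨ r = some "system" then m :: pvKeepFrom r rest else pvKeepFrom r rest

theorem pvFoldA (msgs : List (List (String × String))) :
    ∀ (acc : List (List (String × String))) (last : Option String),
    (msgs.foldl
      (fun (st : List (List (String × String)) × Option String) msg =>
        let current := List.lookup "role" msg
        if current ≠ st.2 ∨ current = some "system" then (st.1 ++ [msg], current) else st)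
      (acc, last)).1 = acc ++ pvKeepFrom last msgs := by
  induction msgs with
  | nil => intro acc last; simp [pvKeepFrom]
  | cons m rest ih =>
    intro acc last
    simp only [List.foldl, pvKeepFrom]
    by_cases h : List.lookup "role" m ≠ last ∨ List.lookup "role" m = some "system"
    · simp only [h, ih]
      simp
    · simp only [if_neg h, ih]
      have hl : List.lookup "role" m = last := by
        by_contra hne; exact h (Or.inl hne)
      rw [hl]

theorem pvZipB (msgs : List (List (String × String))) :
    ∀ (last : Option String),
    ((msgs.zip (msgs.map (fun m => List.lookup "role" m))).zip
        (last :: msgs.map (fun m => List.lookup "role" m))).filterMap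
      (fun p => if p.1.2 = some "system" ∨ p.1.2 ≠ p.2 then some p.1.1 else none)
      = pvKeepFrom last msgs := by
  induction msgs with
  | nil => intro last; simp [pvKeepFrom]
  | cons m rest ih =>
    intro last
    simp only [List.map, List.zip_cons_cons, List.filterMap_cons, pvKeepFrom]
    rw [ih (List.lookup "role" m)]
    by_cases h : List.lookup "role" m = some "system" ∨ List.lookup "role" m ≠ last
    · rw [if_pos h, if_pos (Or.symm h)]
    · rw [if_neg h, if_neg (fun hc => h (Or.symm hc))]

-- ===== VERDICT (by name: the statement is the Claim_ definition above) =====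
theorem ensure_conversation_flow_py_spec : Claim_equal_ensure_conversation_flow_py := by
  intro messages _
  unfold Spec_ensure_conversation_flow_py ensure_conversation_flow_py ensure_conversation_flow_py_alt
  by_cases hm : messages = []
  · subst hm; simp
  · rw [if_neg hm, pvFoldA, pvZipB]
    simp
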